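-- pv_equiv track=rewrite | github.com/vatlab/sos | sos/jupyter/completer.py | last_valid
-- ===== SOURCE A (Python) =====
-- def last_valid(line):
--     text = line
--     #
--     for char in (' ', '\t', '"', "'", '=', '('):
--         if text.endswith(char):
--             text = ''
--         elif char in text:
--             text = text.rsplit(char, 1)[-1]
--     return text
-- ===== SOURCE B (Python) =====
-- def last_valid(line):
--     # One backward scan: collect trailing chars until the first delimiter.
--     out = []
--     for ch in reversed(line):
--         if ch in ' \t"\'=(':
--             break
--         out.append(ch)
--     return ''.join(reversed(out))
-- ===== Notes on version B (the rewrite author's own statement) =====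
-- stated objective: simpler
-- what changed: Replaced A's six sequential passes (one endswith/in/rsplit truncation per delimiter character) by a single backward scan that collects trailing characters until the first delimiter is met.
import Mathlib
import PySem

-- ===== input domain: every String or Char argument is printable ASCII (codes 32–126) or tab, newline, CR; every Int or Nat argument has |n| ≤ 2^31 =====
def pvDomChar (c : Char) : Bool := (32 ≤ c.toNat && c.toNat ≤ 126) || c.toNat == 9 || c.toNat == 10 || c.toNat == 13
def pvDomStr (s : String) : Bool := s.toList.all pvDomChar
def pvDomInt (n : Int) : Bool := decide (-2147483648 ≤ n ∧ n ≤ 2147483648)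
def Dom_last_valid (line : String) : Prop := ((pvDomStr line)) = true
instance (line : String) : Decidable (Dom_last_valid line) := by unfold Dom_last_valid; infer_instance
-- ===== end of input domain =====

-- B replaces A's six sequential endswith/rsplit truncation passes by one backward scan; objective: simpler.

-- ===== PORT A =====
-- text.rsplit(c, 1)[-1]: the suffix after the LAST occurrence of c (exact when c is in text,
-- which is the only place A calls it). Hand port: PySem has no rsplit with maxsplit.
def pyRsplit1Last (c : Char) (t : List Char) : List Char :=
  (t.reverse.takeWhile (· ≠ c)).reverse

def last_valid (line : String) : String :=
  String.ofList <|
    [' ', '\t', '"', '\'', '=', '('].foldl (fun text char =>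
      if PySem.Chars.endswith text [char] then []
      else if PySem.Chars.isIn [char] text then pyRsplit1Last char text
      else text) line.toList

-- ===== PORT B =====
-- the for-loop over reversed(line) with break: collect chars until a delimiter is met
def collectRev : List Char → List Char
  | [] => []
  | c :: rest => if c ∈ (" \t\"'=(".toList) then [] else c :: collectRev rest

def last_valid_alt (line : String) : String :=
  String.ofList (collectRev line.toList.reverse).reverse

-- ===== PRECONDITION & SPEC =====
def Spec_last_valid (line : String) (out : String) : Prop := out = last_valid_alt line
instance (line : String) (out : String) : Decidable (Spec_last_valid line out) := by unfold Spec_last_valid; infer_instance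

-- ===== CLAIM (what is proved, stated in full; the proofs are below) =====
def Claim_equal_last_valid : Prop := ∀ (line : String), Dom_last_valid line → Spec_last_valid line (last_valid line)

-- ===== LEMMAS AND PROOFS =====

-- A's per-delimiter step is uniformly "take the suffix after the last occurrence of c":
-- the endswith branch and the c-absent branch are special cases of the same takeWhile.
theorem stepA_eq (t : List Char) (c : Char) :
    (if PySem.Chars.endswith t [c] then ([] : List Char)
     else if PySem.Chars.isIn [c] t then pyRsplit1Last c t
     else t)
    = (t.reverse.takeWhile (· ≠ c)).reverse := by
  by_cases he : PySem.Chars.endswith t [c] = true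
  · rw [if_pos he]
    obtain ⟨u, rfl⟩ := (PySem.Chars.endswith_iff t [c]).1 he
    simp
  · rw [if_neg he]
    by_cases hi : PySem.Chars.isIn [c] t = true
    · rw [if_pos hi]; rfl
    · rw [if_neg hi]
      have hni : ¬ [c] <:+: t := fun h => hi ((PySem.Chars.isIn_iff_infix [c] t).2 h)
      have hc : c ∉ t := by
        intro hm
        obtain ⟨s, t2, rfl⟩ := List.append_of_mem hm
        exact hni ⟨s, t2, by simp⟩
      have htw : t.reverse.takeWhile (· ≠ c) = t.reverse := by
        apply List.takeWhile_eq_self_iff.2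
        intro x hx
        simp only [decide_eq_true_eq]
        intro hxc
        exact hc (hxc ▸ List.mem_reverse.1 hx)
      rw [htw, List.reverse_reverse]

theorem foldl_stepA (L : List Char) : ∀ t : List Char,
    L.foldl (fun text char =>
      if PySem.Chars.endswith text [char] then []
      else if PySem.Chars.isIn [char] text then pyRsplit1Last char text
      else text) t
    = (L.foldl (fun r c => r.takeWhile (· ≠ c)) t.reverse).reverse := by
  induction L with
  | nil => intro t; simp
  | cons c L ih =>
    intro t
    simp only [List.foldl_cons]
    rw [stepA_eq, ih, List.reverse_reverse]

theorem foldl_takeWhile (L : List Char) : ∀ r : List Char,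
    L.foldl (fun r c => r.takeWhile (· ≠ c)) r = r.takeWhile (fun x => !L.contains x) := by
  induction L with
  | nil =>
    intro r
    simp only [List.foldl_nil, List.contains_nil, Bool.not_false]
    exact (List.takeWhile_eq_self_iff.2 (by simp)).symm
  | cons c L ih =>
    intro r
    simp only [List.foldl_cons]
    rw [ih, List.takeWhile_takeWhile]
    congr 1
    funext x
    simp [Bool.not_or, decide_not, Bool.and_comm]

theorem collectRev_eq (cs : List Char) :
    collectRev cs = cs.takeWhile (fun x => !(" \t\"'=(".toList).contains x) := by
  induction cs with
  | nil => rfl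
  | cons c cs ih =>
    by_cases h : c ∈ (" \t\"'=(".toList)
    · simp only [collectRev, List.takeWhile_cons, List.contains_eq_mem]
      simp at h
      rcases h with rfl | rfl | rfl | rfl | rfl | rfl <;> simp
    · simp only [collectRev, List.takeWhile_cons, List.contains_eq_mem]
      simp at h
      obtain ⟨h1, h2, h3, h4, h5, h6⟩ := h
      simp [h1, h2, h3, h4, h5, h6, ih]

-- ===== VERDICT (by name: the statement is the Claim_ definition above) =====
theorem last_valid_spec : Claim_equal_last_valid := by
  intro line _
  unfold Spec_last_valid last_valid last_valid_alt
  rw [foldl_stepA, foldl_takeWhile, collectRev_eq]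
  rfl
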